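-- pv_equiv track=rewrite | github.com/linhdvu14/cp-sols | sols/CodeForces/practice/D_Expression_Evaluation_Error.py | solve
-- ===== SOURCE A (Python) =====
-- def solve(S, N):
--     res = [0] * N
--     ten = 10**9
--     pos = 0  # idx of first zero ele in res; N - x is num nonzero eles left
--
--     while ten:
--         # greedily use max number of ten powers s.t. enough to make res nonzero
--         for x in range(N - pos, -1, -1):
--             if S - ten * x + x >= N - pos:
--                 for i in range(pos, pos + x): res[i] += ten
--                 S -= x * ten
--                 pos += x
--                 break
--         ten //= 10
--
--     res[0] += S
--     return res
-- ===== SOURCE B (Python) =====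
-- def solve(S, N):
--     res = [0] * N
--     pos = 0
--     for p in range(9, -1, -1):
--         ten = 10 ** p
--         rem = N - pos
--         if S >= rem:
--             x = rem if ten == 1 else min(rem, (S - rem) // (ten - 1))
--             for i in range(pos, pos + x):
--                 res[i] += ten
--             S -= x * ten
--             pos += x
--     res[0] += S
--     return res
-- ===== Notes on version B (the rewrite author's own statement) =====
-- stated objective: faster
-- what changed: The inner downward linear scan over candidate counts x is replaced by a closed-form floor-division computation of the maximal valid x per power of ten.
import Mathlib
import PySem

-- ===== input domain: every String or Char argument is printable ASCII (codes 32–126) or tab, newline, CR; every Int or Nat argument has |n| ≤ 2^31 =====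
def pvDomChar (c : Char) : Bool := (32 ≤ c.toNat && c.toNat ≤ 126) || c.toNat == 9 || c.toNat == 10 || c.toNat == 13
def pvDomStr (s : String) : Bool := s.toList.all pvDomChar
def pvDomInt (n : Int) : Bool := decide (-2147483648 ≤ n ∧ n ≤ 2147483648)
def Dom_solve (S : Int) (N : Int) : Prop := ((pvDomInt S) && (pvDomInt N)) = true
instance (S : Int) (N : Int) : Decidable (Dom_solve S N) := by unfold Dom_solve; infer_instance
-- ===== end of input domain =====

-- B replaces A's inner downward scan for x by a closed-form floor-division computation (objective: simpler).

-- ===== PORT A =====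
-- 'for i in range(pos, pos + x): res[i] += ten'; every i reached is a valid nonnegative index here
def bumpA (res : List Int) (pos x ten : Int) : List Int :=
  (PySem.List.pyRange pos (pos + x) 1).foldl
    (fun r i => r.set i.toNat (r.getD i.toNat 0 + ten)) res

-- the inner 'for x in range(N - pos, -1, -1): if …: …; break'
def scanA (xs : List Int) (res : List Int) (S ten pos N : Int) : List Int × Int × Int :=
  match xs with
  | [] => (res, S, pos)
  | x :: rest =>
    if S - ten * x + x ≥ N - pos then (bumpA res pos x ten, S - x * ten, pos + x)
    else scanA rest res S ten pos N

-- 'while ten:'; ten takes only the values 10^9,10^8,…,1,0 here, so the guard ten ≤ 0 coincides with Python's 'ten == 0'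
def whileA (res : List Int) (S ten pos N : Int) : List Int × Int :=
  if ten ≤ 0 then (res, S)
  else
    let t := scanA (PySem.List.pyRange (N - pos) (-1) (-1)) res S ten pos N
    whileA t.1 t.2.1 (PySem.Int.floordiv ten 10) t.2.2 N
termination_by ten.toNat
decreasing_by
  rename_i h
  rw [PySem.Int.floordiv_eq_ediv_of_pos (by omega : (0:Int) < 10)]
  omega

def solve (S : Int) (N : Int) : List Int :=
  let res := List.replicate N.toNat (0 : Int)   -- [0] * N
  let t := whileA res S (10 ^ 9) 0 N
  -- res[0] += S; index 0 is valid since Pre_solve gives 1 ≤ N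
  t.1.set 0 (t.1.getD 0 0 + t.2)

-- ===== PORT B =====
-- 'for i in range(pos, pos + x): res[i] += ten' (B's inner accumulation loop)
def bumpB (res : List Int) (pos x ten : Int) : List Int :=
  (PySem.List.pyRange pos (pos + x) 1).foldl
    (fun r i => r.set i.toNat (r.getD i.toNat 0 + ten)) res

-- one iteration of B's 'for p in range(9, -1, -1)' loop
def stepB (N : Int) (st : List Int × Int × Int) (p : Int) : List Int × Int × Int :=
  let res := st.1
  let S := st.2.1
  let pos := st.2.2
  let ten : Int := 10 ^ p.toNat   -- 10 ** p, p ∈ [0, 9]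
  let rem := N - pos
  if S ≥ rem then
    let x := if ten = 1 then rem else min rem (PySem.Int.floordiv (S - rem) (ten - 1))
    (bumpB res pos x ten, S - x * ten, pos + x)
  else st

def solve_alt (S : Int) (N : Int) : List Int :=
  let t := (PySem.List.pyRange 9 (-1) (-1)).foldl (stepB N) (List.replicate N.toNat (0 : Int), S, 0)
  t.1.set 0 (t.1.getD 0 0 + t.2.1)

-- ===== PRECONDITION & SPEC =====
-- Pre_ excludes N ≤ 0, on which A's final 'res[0] += S' raises IndexError (res is empty); B raises there too.
def Pre_solve (S : Int) (N : Int) : Prop := 1 ≤ N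
instance (S : Int) (N : Int) : Decidable (Pre_solve S N) := by unfold Pre_solve; infer_instance
def pvWitness_solve : Int × Int := (1234, 5)

def Spec_solve (S : Int) (N : Int) (out : List Int) : Prop := out = solve_alt S N
instance (S : Int) (N : Int) (out : List Int) : Decidable (Spec_solve S N out) := by unfold Spec_solve; infer_instance

-- ===== CLAIM (what is proved, stated in full; the proofs are below) =====
def Claim_equal_solve : Prop := ∀ (S : Int) (N : Int), Dom_solve S N → Pre_solve S N → Spec_solve S N (solve S N)

-- ===== LEMMAS AND PROOFS =====

-- if no candidate x satisfies the condition, the scan leaves the state unchanged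
lemma scanA_none (xs : List Int) (res : List Int) (S ten pos N : Int)
    (h : ∀ x ∈ xs, ¬(S - ten * x + x ≥ N - pos)) :
    scanA xs res S ten pos N = (res, S, pos) := by
  induction xs with
  | nil => rfl
  | cons x rest ih =>
    rw [scanA, if_neg (h x (List.mem_cons_self))]
    exact ih (fun y hy => h y (List.mem_cons_of_mem x hy))

-- first hit of a threshold condition on the descending range [n, n-1, …, 0]
lemma scanA_desc (S ten pos N T : Int)
    (hcond : ∀ x : Int, (S - ten * x + x ≥ N - pos) ↔ x ≤ T) :
    ∀ (n : Nat) (res : List Int),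
      scanA (PySem.List.pyRange (n : Int) (-1) (-1)) res S ten pos N =
        if 0 ≤ T then
          (bumpA res pos (min (n : Int) T) ten, S - (min (n : Int) T) * ten, pos + min (n : Int) T)
        else (res, S, pos) := by
  intro n
  induction n with
  | zero =>
    intro res
    rw [show ((0:Nat):Int) = 0 by norm_num,
        PySem.List.pyRange_neg_one_cons (by norm_num : (-1:Int) < 0),
        show (0:Int) - 1 = -1 by norm_num,
        PySem.List.pyRange_neg_one_eq_nil (le_refl (-1))]
    rw [scanA]
    by_cases hT : (0:Int) ≤ T
    · rw [if_pos ((hcond 0).2 hT), if_pos hT, min_eq_left hT]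
    · rw [if_neg (fun hc => hT ((hcond 0).1 hc)), if_neg hT, scanA]
  | succ n ih =>
    intro res
    have hcast : ((n + 1 : Nat) : Int) = (n : Int) + 1 := by push_cast; ring
    rw [hcast, PySem.List.pyRange_neg_one_cons (by omega : (-1:Int) < (n:Int) + 1),
        show (n : Int) + 1 - 1 = (n : Int) by ring]
    rw [scanA]
    by_cases hx : (n : Int) + 1 ≤ T
    · rw [if_pos ((hcond _).2 hx), if_pos (by omega : (0:Int) ≤ T),
          min_eq_left (by exact hx)]
    · rw [if_neg (fun hc => hx ((hcond _).1 hc)), ih res]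
      have hT' : T ≤ (n : Int) := by omega
      by_cases h0 : (0:Int) ≤ T
      · rw [if_pos h0, if_pos h0, min_eq_right hT', min_eq_right (by omega)]
      · rw [if_neg h0, if_neg h0]

-- the scan over a power of ten equals the closed-form choice of x
lemma scanA_step (res : List Int) (S ten pos N : Int)
    (hrem : 0 ≤ N - pos) (hten : 1 ≤ ten) :
    scanA (PySem.List.pyRange (N - pos) (-1) (-1)) res S ten pos N =
      if S ≥ N - pos then
        let x := if ten = 1 then N - pos
                 else min (N - pos) (PySem.Int.floordiv (S - (N - pos)) (ten - 1))
        (bumpA res pos x ten, S - x * ten, pos + x)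
      else (res, S, pos) := by
  by_cases h1 : ten = 1
  · subst h1
    by_cases hS : S ≥ N - pos
    · have hcons : PySem.List.pyRange (N - pos) (-1) (-1)
          = (N - pos) :: PySem.List.pyRange (N - pos - 1) (-1) (-1) :=
        PySem.List.pyRange_neg_one_cons (by omega)
      rw [hcons, scanA, if_pos (by omega), if_pos hS]
      simp
    · rw [scanA_none _ _ _ _ _ _ (fun x _ => by omega), if_neg hS]
  · have hten2 : 2 ≤ ten := by omega
    set T := PySem.Int.floordiv (S - (N - pos)) (ten - 1) with hTdef
    have hcond : ∀ x : Int, (S - ten * x + x ≥ N - pos) ↔ x ≤ T := by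
      intro x
      rw [hTdef, PySem.Int.le_floordiv_iff_mul_le (by omega : (0:Int) < ten - 1)]
      constructor
      · intro hc
        nlinarith
      · intro hc
        nlinarith
    have hT0 : (0:Int) ≤ T ↔ S ≥ N - pos := by
      rw [hTdef, PySem.Int.le_floordiv_iff_mul_le (by omega : (0:Int) < ten - 1)]
      constructor <;> intro h <;> nlinarith
    have hn : ((N - pos).toNat : Int) = N - pos := Int.toNat_of_nonneg hrem
    have := scanA_desc S ten pos N T hcond (N - pos).toNat res
    rw [hn] at this
    rw [this]
    by_cases hS : S ≥ N - pos
    · rw [if_pos (hT0.2 hS), if_pos hS]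
      simp only [if_neg h1]
    · rw [if_neg (fun h0 => hS (hT0.1 h0)), if_neg hS]

lemma bumpA_eq_bumpB : bumpA = bumpB := rfl

-- A's while-loop starting at ten = 10^p equals B's fold over [p, p-1, …, 0]
lemma whileA_eq_fold (N : Int) :
    ∀ (p : Nat) (res : List Int) (S pos : Int), 0 ≤ N - pos →
      whileA res S ((10:Int) ^ p) pos N =
        (let t := (PySem.List.pyRange (p : Int) (-1) (-1)).foldl (stepB N) (res, S, pos)
         (t.1, t.2.1)) := by
  intro p
  induction p with
  | zero =>
    intro res S pos hrem
    rw [whileA, if_neg (by norm_num)]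
    rw [show PySem.Int.floordiv ((10:Int)^0) 10 = 0 by decide]
    rw [whileA, if_pos (le_refl 0)]
    rw [show ((0:Nat):Int) = 0 by norm_num,
        PySem.List.pyRange_neg_one_cons (by norm_num : (-1:Int) < 0),
        show (0:Int) - 1 = -1 by norm_num,
        PySem.List.pyRange_neg_one_eq_nil (le_refl (-1))]
    simp only [List.foldl_cons, List.foldl_nil]
    rw [scanA_step res S ((10:Int)^0) pos N hrem (by norm_num)]
    rw [stepB]
    simp only [pow_zero]
    by_cases hS : S ≥ N - pos
    · rw [if_pos hS, if_pos hS]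
      simp [bumpA_eq_bumpB, Int.toNat_zero]
    · rw [if_neg hS, if_neg hS]
  | succ p ih =>
    intro res S pos hrem
    have hpow : (0:Int) < 10 ^ (p + 1) := by positivity
    rw [whileA, if_neg (by omega)]
    have hdiv : PySem.Int.floordiv ((10:Int) ^ (p + 1)) 10 = 10 ^ p := by
      rw [PySem.Int.floordiv_eq_ediv_of_pos (by norm_num : (0:Int) < 10), pow_succ]
      exact Int.mul_ediv_cancel _ (by norm_num)
    rw [hdiv]
    rw [scanA_step res S ((10:Int)^(p+1)) pos N hrem (by omega)]
    have hcast : ((p + 1 : Nat) : Int) = (p : Int) + 1 := by push_cast; ring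
    rw [hcast, PySem.List.pyRange_neg_one_cons (by omega : (-1:Int) < (p:Int) + 1),
        show (p : Int) + 1 - 1 = (p : Int) by ring]
    simp only [List.foldl_cons]
    have hstep : stepB N (res, S, pos) ((p:Int) + 1) =
        (if S ≥ N - pos then
          let x := if (10:Int)^(p+1) = 1 then N - pos
                   else min (N - pos) (PySem.Int.floordiv (S - (N - pos)) ((10:Int)^(p+1) - 1))
          (bumpA res pos x ((10:Int)^(p+1)), S - x * ((10:Int)^(p+1)), pos + x)
        else (res, S, pos)) := by
      rw [stepB]
      have htn : ((p:Int) + 1).toNat = p + 1 := by omega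
      simp only [htn, bumpA_eq_bumpB]
    rw [hstep]
    by_cases hS : S ≥ N - pos
    · have hne : ¬((10:Int)^(p+1) = 1) := by
        intro h
        have h10 : (10:Int)^1 ≤ 10^(p+1) := pow_le_pow_right₀ (by norm_num) (by omega)
        simp at h10
        omega
      simp only [if_pos hS, if_neg hne]
      have hxle : min (N - pos) (PySem.Int.floordiv (S - (N - pos)) ((10:Int)^(p+1) - 1))
          ≤ N - pos := min_le_left _ _
      exact ih _ _ _ (by omega)
    · simp only [if_neg hS]
      exact ih res S pos hrem

-- ===== VERDICT (by name: the statement is the Claim_ definition above) =====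
theorem solve_spec : Claim_equal_solve := by
  intro S N _ hPre
  have hN : 1 ≤ N := hPre
  have h := whileA_eq_fold N 9 (List.replicate N.toNat (0:Int)) S 0 (by omega)
  rw [show ((9:Nat):Int) = (9:Int) by norm_num] at h
  unfold Spec_solve solve solve_alt
  simp only [h]
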